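-- pv_equiv track=rewrite | github.com/lukacslacko/csaszar | csaszar.py | vertex_link_is_disk
-- ===== SOURCE A (Python) =====
-- def vertex_link_is_disk(vertex, faces_containing):
--     """Check the star of `vertex` forms a cone (i.e. link is a single cycle).
--
--     Each incident face contributes an edge of the link (the opposite edge of
--     the triangle). A closed manifold disk means every link-vertex has degree
--     exactly 2 and the link graph is connected.
--     """
--     # Link edges: for face (v, a, b) the link edge is (a, b)
--     link_edges = []
--     link_verts = set()
--     for face in faces_containing:
--         opp = [x for x in face if x != vertex]
--         link_edges.append(tuple(sorted(opp)))
--         link_verts.update(opp)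
--     # Each link vertex must appear in exactly 2 link edges.
--     deg = {v: 0 for v in link_verts}
--     for (a, b) in link_edges:
--         deg[a] += 1
--         deg[b] += 1
--     if any(d != 2 for d in deg.values()):
--         return False
--     # Connectivity (single cycle).
--     adj = {v: [] for v in link_verts}
--     for (a, b) in link_edges:
--         adj[a].append(b)
--         adj[b].append(a)
--     start = next(iter(link_verts))
--     seen = {start}
--     stack = [start]
--     while stack:
--         u = stack.pop()
--         for w in adj[u]:
--             if w not in seen:
--                 seen.add(w)
--                 stack.append(w)
--     return len(seen) == len(link_verts)
-- ===== SOURCE B (Python) =====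
-- def vertex_link_is_disk(vertex, faces_containing):
--     """Union-by-relabel connectivity instead of DFS: merge component labels per link edge."""
--     edges = [tuple(sorted(x for x in face if x != vertex)) for face in faces_containing]
--     verts = {v for e in edges for v in e}
--     if any(sum((v == a) + (v == b) for (a, b) in edges) != 2 for v in verts):
--         return False
--     comp = {v: v for v in verts}
--     for (a, b) in edges:
--         ca, cb = comp[a], comp[b]
--         if ca != cb:
--             comp = {v: (cb if c == ca else c) for v, c in comp.items()}
--     return len(set(comp.values())) == 1
-- ===== Notes on version B (the rewrite author's own statement) =====
-- stated objective: alternative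
-- what changed: The stack-based DFS connectivity check over an adjacency-list dict is replaced by Kruskal-style union-by-relabel: components start as singleton labels, each link edge merges two label classes by relabelling, and the link is connected iff one label class remains; the degree test becomes a per-vertex incidence sum instead of a mutated counter dict.
import Mathlib
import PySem

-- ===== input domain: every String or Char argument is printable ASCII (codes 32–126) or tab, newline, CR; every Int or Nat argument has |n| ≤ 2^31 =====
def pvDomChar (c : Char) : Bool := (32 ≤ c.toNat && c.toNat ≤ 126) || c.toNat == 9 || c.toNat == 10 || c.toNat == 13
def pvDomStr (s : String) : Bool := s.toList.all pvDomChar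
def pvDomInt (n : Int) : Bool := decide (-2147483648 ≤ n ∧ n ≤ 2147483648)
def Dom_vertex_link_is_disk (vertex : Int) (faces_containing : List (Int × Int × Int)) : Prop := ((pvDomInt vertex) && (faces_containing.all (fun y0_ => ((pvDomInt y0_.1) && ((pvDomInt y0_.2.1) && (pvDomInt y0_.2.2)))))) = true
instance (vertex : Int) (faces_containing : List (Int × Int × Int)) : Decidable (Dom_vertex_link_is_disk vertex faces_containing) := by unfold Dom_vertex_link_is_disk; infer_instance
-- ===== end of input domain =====

-- B replaces A's stack-based DFS connectivity check by Kruskal-style union-by-relabel over component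
-- labels (alternative algorithm, similar size; not claimed faster).


-- ===== PORT A =====
-- [x for x in face if x != vertex]
def pvOpp (vertex : Int) (face : Int × Int × Int) : List Int :=
  [face.1, face.2.1, face.2.2].filter (fun x => decide (x ≠ vertex))

-- tuple(sorted(opp)); Python raises ValueError when unpacking a tuple whose length is not 2,
-- so faces with len(opp) ≠ 2 are outside Pre_ and the fallback (0, 0) is never relevant there.
def pvEdge (vertex : Int) (face : Int × Int × Int) : Int × Int :=
  match PySem.List.sorted (pvOpp vertex face) (fun x => x) false with
  | [a, b] => (a, b)
  | _ => (0, 0)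

-- the body of A's 'for w in adj[u]' loop, threading (seen, stack) (stack head = top)
def pvDFSstep (seen : PySem.Set Int) (stack : List Int) (nbrs : List Int) :
    PySem.Set Int × List Int :=
  nbrs.foldl
    (fun (p : PySem.Set Int × List Int) w =>
      if w ∉ p.1 then (PySem.Set.add p.1 w, w :: p.2) else p)
    (seen, stack)

theorem pvDFSstep_mem (nbrs : List Int) (s : PySem.Set Int) (st : List Int) (x : Int) :
    (x ∈ (pvDFSstep s st nbrs).1 ↔ x ∈ s ∨ x ∈ nbrs) ∧
    (x ∈ (pvDFSstep s st nbrs).2 ↔ x ∈ st ∨ (x ∈ nbrs ∧ x ∉ s)) := by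
  induction nbrs generalizing s st with
  | nil => simp [pvDFSstep]
  | cons w t ih =>
    by_cases hw : w ∈ s
    · rw [show pvDFSstep s st (w :: t) = pvDFSstep s st t from by simp [pvDFSstep, hw]]
      obtain ⟨h1, h2⟩ := ih s st
      refine ⟨?_, ?_⟩
      · rw [h1]; simp only [List.mem_cons]
        constructor
        · rintro (h | h); exacts [Or.inl h, Or.inr (Or.inr h)]
        · rintro (h | rfl | h); exacts [Or.inl h, Or.inl hw, Or.inr h]
      · rw [h2]; simp only [List.mem_cons]
        constructor
        · rintro (h | ⟨h, hn⟩); exacts [Or.inl h, Or.inr ⟨Or.inr h, hn⟩]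
        · rintro (h | ⟨rfl | h, hn⟩); exacts [Or.inl h, absurd hw hn, Or.inr ⟨h, hn⟩]
    · rw [show pvDFSstep s st (w :: t) = pvDFSstep (PySem.Set.add s w) (w :: st) t from by
        simp [pvDFSstep, hw]]
      obtain ⟨h1, h2⟩ := ih (PySem.Set.add s w) (w :: st)
      refine ⟨?_, ?_⟩
      · rw [h1, PySem.Set.mem_add]; simp only [List.mem_cons]; tauto
      · rw [h2]; simp only [PySem.Set.mem_add, List.mem_cons]
        constructor
        · rintro ((rfl | h) | ⟨h, hn⟩)
          · exact Or.inr ⟨Or.inl rfl, hw⟩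
          · exact Or.inl h
          · exact Or.inr ⟨Or.inr h, fun hs => hn (Or.inl hs)⟩
        · rintro (h | ⟨rfl | h, hn⟩)
          · exact Or.inl (Or.inr h)
          · exact Or.inl (Or.inl rfl)
          · by_cases hxw : x = w
            · exact Or.inl (Or.inl hxw)
            · exact Or.inr ⟨h, fun hc => hc.elim hn hxw⟩

theorem pvDFSstep_unchanged (nbrs : List Int) (s : PySem.Set Int) (st : List Int)
    (h : ∀ w ∈ nbrs, w ∈ s) : pvDFSstep s st nbrs = (s, st) := by
  induction nbrs with
  | nil => rfl
  | cons w t ih =>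
    have hw : w ∈ s := h w (List.mem_cons_self ..)
    have : pvDFSstep s st (w :: t) = pvDFSstep s st t := by simp [pvDFSstep, hw]
    rw [this]
    exact ih fun w hw => h w (List.mem_cons_of_mem _ hw)

theorem pv_mem_getD_flatten (adj : PySem.Dict Int (List Int)) (u x : Int)
    (h : x ∈ adj.getD u []) : x ∈ adj.values.flatten := by
  rcases hg : adj.get? u with _ | v
  · rw [PySem.Dict.getD_of_get?_eq_none _ _ hg] at h; cases h
  · rw [PySem.Dict.getD_of_get?_eq_some _ _ hg] at h
    have hv : v ∈ adj.values :=
      List.mem_map.mpr ⟨(u, v), PySem.Dict.mem_items_of_get?_eq_some _ hg, rfl⟩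
    exact List.mem_flatten.mpr ⟨v, hv, h⟩

-- A's 'while stack:' loop
def pvDFS (adj : PySem.Dict Int (List Int)) (seen : PySem.Set Int) (stack : List Int) :
    PySem.Set Int :=
  match stack with
  | [] => seen
  | u :: rest =>
    pvDFS adj (pvDFSstep seen rest (adj.getD u [])).1 (pvDFSstep seen rest (adj.getD u [])).2
termination_by
  (((adj.values.flatten).filter (fun x => decide (x ∉ seen))).length, stack.length)
decreasing_by
  by_cases h : ∀ w ∈ adj.getD u [], w ∈ seen
  · rw [pvDFSstep_unchanged _ _ _ h]
    exact Prod.Lex.right _ (Nat.lt_succ_self _)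
  · push_neg at h
    obtain ⟨w, hw, hws⟩ := h
    apply Prod.Lex.left
    have hmono : ∀ a : Int, (decide (a ∉ (pvDFSstep seen rest (adj.getD u [])).1) = true) →
        (decide (a ∉ seen) = true) := by
      intro a ha
      simp only [decide_eq_true_eq] at ha ⊢
      intro hma
      exact ha (((pvDFSstep_mem _ _ _ a).1).mpr (Or.inl hma))
    have hss := List.monotone_filter_right (adj.values.flatten) hmono
    refine Nat.lt_of_le_of_ne hss.length_le (fun he => ?_)
    have heq := hss.eq_of_length he
    have hwin : w ∈ (adj.values.flatten).filter (fun x => decide (x ∉ seen)) :=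
      List.mem_filter.mpr ⟨pv_mem_getD_flatten adj u w hw, by simpa using hws⟩
    rw [← heq] at hwin
    have := (List.mem_filter.mp hwin).2
    simp only [decide_eq_true_eq] at this
    exact this (((pvDFSstep_mem _ _ _ w).1).mpr (Or.inr hw))

def vertex_link_is_disk (vertex : Int) (faces_containing : List (Int × Int × Int)) : Bool :=
  let el := faces_containing.foldl
    (fun (s : List (Int × Int) × PySem.Set Int) face =>
      (s.1 ++ [pvEdge vertex face], PySem.Set.update s.2 (pvOpp vertex face)))
    ([], PySem.Set.empty)
  let link_edges := el.1
  let link_verts := el.2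
  let deg := link_edges.foldl
    (fun d e => (PySem.Dict.modify d e.1 0 (· + 1)).modify e.2 0 (· + 1))
    (link_verts.foldl (fun d v => d.insert v (0 : Int)) PySem.Dict.empty)
  if deg.values.any (fun d => decide (d ≠ 2)) then false
  else
    let adj := link_edges.foldl
      (fun d e => (PySem.Dict.modify d e.1 [] (· ++ [e.2])).modify e.2 [] (· ++ [e.1]))
      (link_verts.foldl (fun d v => d.insert v ([] : List Int)) PySem.Dict.empty)
    match link_verts with
    | [] => false   -- Python: next(iter(set())) raises StopIteration; outside Pre_
    | start :: _ =>
      let seen := pvDFS adj (PySem.Set.ofList [start]) [start]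
      PySem.Set.len seen == PySem.Set.len link_verts

-- ===== PORT B =====
-- body of B's 'for (a, b) in edges:' loop: merge the two component labels by relabelling
def pvMerge (c : PySem.Dict Int Int) (e : Int × Int) : PySem.Dict Int Int :=
  let ca := c.getD e.1 0   -- Python comp[a]; the key is present for inputs in Pre_
  let cb := c.getD e.2 0
  if ca ≠ cb then
    PySem.Dict.ofList (c.items.map (fun p => (p.1, if p.2 = ca then cb else p.2)))
  else c

def vertex_link_is_disk_alt (vertex : Int) (faces_containing : List (Int × Int × Int)) : Bool :=
  let edges := faces_containing.map (fun face => pvEdge vertex face)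
  let verts : PySem.Set Int := PySem.Set.ofList (edges.flatMap (fun e => [e.1, e.2]))
  if verts.any (fun v =>
      decide ((edges.map (fun e =>
        (if v = e.1 then (1 : Int) else 0) + (if v = e.2 then 1 else 0))).sum ≠ 2)) then
    false
  else
    let comp := edges.foldl pvMerge (PySem.Dict.ofList (verts.map (fun v => (v, v))))
    PySem.Set.len (PySem.Set.ofList comp.values) == 1

-- ===== PRECONDITION & SPEC =====
-- Pre_ excludes exactly the inputs where the Python A raises: an empty face list (StopIteration
-- at next(iter(link_verts))) and faces not containing `vertex` exactly once (ValueError when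
-- unpacking the opposite edge as a pair).
def Pre_vertex_link_is_disk (vertex : Int) (faces_containing : List (Int × Int × Int)) : Prop :=
  faces_containing ≠ [] ∧
  ∀ f ∈ faces_containing, ([f.1, f.2.1, f.2.2].countP (fun x => decide (x = vertex))) = 1
instance (vertex : Int) (faces_containing : List (Int × Int × Int)) : Decidable (Pre_vertex_link_is_disk vertex faces_containing) := by unfold Pre_vertex_link_is_disk; infer_instance

def pvWitness_vertex_link_is_disk : Int × (List (Int × Int × Int)) :=
  (0, [(0, 1, 2), (0, 2, 1)])

def Spec_vertex_link_is_disk (vertex : Int) (faces_containing : List (Int × Int × Int)) (out : Bool) : Prop := out = vertex_link_is_disk_alt vertex faces_containing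
instance (vertex : Int) (faces_containing : List (Int × Int × Int)) (out : Bool) : Decidable (Spec_vertex_link_is_disk vertex faces_containing out) := by unfold Spec_vertex_link_is_disk; infer_instance

-- ===== CLAIM (what is proved, stated in full; the proofs are below) =====
def Claim_equal_vertex_link_is_disk : Prop := ∀ (vertex : Int) (faces_containing : List (Int × Int × Int)), Dom_vertex_link_is_disk vertex faces_containing → Pre_vertex_link_is_disk vertex faces_containing → Spec_vertex_link_is_disk vertex faces_containing (vertex_link_is_disk vertex faces_containing)

-- ===== LEMMAS AND PROOFS =====

-- ---- graph-side notions used only by the proofs ----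

def pvE (vertex : Int) (faces : List (Int × Int × Int)) : List (Int × Int) :=
  faces.map (pvEdge vertex)

def pvVA (vertex : Int) (faces : List (Int × Int × Int)) : PySem.Set Int :=
  faces.foldl (fun s f => PySem.Set.update s (pvOpp vertex f)) PySem.Set.empty

def pvVB (vertex : Int) (faces : List (Int × Int × Int)) : PySem.Set Int :=
  PySem.Set.ofList ((pvE vertex faces).flatMap (fun e => [e.1, e.2]))

def pvStep (E : List (Int × Int)) (u w : Int) : Prop :=
  ∃ e ∈ E, (e.1 = u ∧ e.2 = w) ∨ (e.1 = w ∧ e.2 = u)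

def pvConn (E : List (Int × Int)) : Int → Int → Prop :=
  Relation.ReflTransGen (pvStep E)

theorem pvStep_symm (E : List (Int × Int)) (u w : Int) (h : pvStep E u w) : pvStep E w u := by
  obtain ⟨e, he, h⟩ := h
  exact ⟨e, he, h.symm⟩

theorem pvConn_symm (E : List (Int × Int)) (u w : Int) (h : pvConn E u w) : pvConn E w u :=
  Relation.ReflTransGen.symmetric (fun _ _ h => pvStep_symm E _ _ h) h

theorem pv_rtg_congr {r r' : Int → Int → Prop} (h : ∀ x y, r x y ↔ r' x y) (u w : Int) :
    Relation.ReflTransGen r u w ↔ Relation.ReflTransGen r' u w :=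
  ⟨Relation.ReflTransGen.mono (fun x y => (h x y).mp),
   Relation.ReflTransGen.mono (fun x y => (h x y).mpr)⟩

theorem pv_rtg_pair (r : Int → Int → Prop) (a b u w : Int) :
    Relation.ReflTransGen (fun x y => r x y ∨ (x = a ∧ y = b) ∨ (x = b ∧ y = a)) u w ↔
      (Relation.ReflTransGen r u w ∨
       (Relation.ReflTransGen r u a ∧ Relation.ReflTransGen r b w) ∨
       (Relation.ReflTransGen r u b ∧ Relation.ReflTransGen r a w)) := by
  constructor
  · intro h
    induction h with
    | refl => exact Or.inl Relation.ReflTransGen.refl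
    | tail hprev hstep ih =>
      rcases hstep with hr | ⟨rfl, rfl⟩ | ⟨rfl, rfl⟩
      · rcases ih with d1 | ⟨d2a, d2b⟩ | ⟨d3a, d3b⟩
        · exact Or.inl (d1.tail hr)
        · exact Or.inr (Or.inl ⟨d2a, d2b.tail hr⟩)
        · exact Or.inr (Or.inr ⟨d3a, d3b.tail hr⟩)
      · rcases ih with d1 | ⟨d2a, d2b⟩ | ⟨d3a, d3b⟩
        · exact Or.inr (Or.inl ⟨d1, Relation.ReflTransGen.refl⟩)
        · exact Or.inr (Or.inl ⟨d2a, Relation.ReflTransGen.refl⟩)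
        · exact Or.inl d3a
      · rcases ih with d1 | ⟨d2a, d2b⟩ | ⟨d3a, d3b⟩
        · exact Or.inr (Or.inr ⟨d1, Relation.ReflTransGen.refl⟩)
        · exact Or.inl d2a
        · exact Or.inr (Or.inr ⟨d3a, Relation.ReflTransGen.refl⟩)
  · have hmono : ∀ {x y : Int}, Relation.ReflTransGen r x y →
        Relation.ReflTransGen (fun x y => r x y ∨ (x = a ∧ y = b) ∨ (x = b ∧ y = a)) x y :=
      fun h => h.mono (fun x y hr => Or.inl hr)
    have hab : Relation.ReflTransGen
        (fun x y => r x y ∨ (x = a ∧ y = b) ∨ (x = b ∧ y = a)) a b :=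
      Relation.ReflTransGen.single (Or.inr (Or.inl ⟨rfl, rfl⟩))
    have hba : Relation.ReflTransGen
        (fun x y => r x y ∨ (x = a ∧ y = b) ∨ (x = b ∧ y = a)) b a :=
      Relation.ReflTransGen.single (Or.inr (Or.inr ⟨rfl, rfl⟩))
    rintro (d | ⟨d1, d2⟩ | ⟨d1, d2⟩)
    · exact hmono d
    · exact ((hmono d1).trans hab).trans (hmono d2)
    · exact ((hmono d1).trans hba).trans (hmono d2)

theorem pvStep_append_pair (E : List (Int × Int)) (e : Int × Int) (x y : Int) :
    pvStep (E ++ [e]) x y ↔ (pvStep E x y ∨ (x = e.1 ∧ y = e.2) ∨ (x = e.2 ∧ y = e.1)) := by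
  simp only [pvStep, List.mem_append, List.mem_singleton]
  constructor
  · rintro ⟨f, hf | rfl, hor⟩
    · exact Or.inl ⟨f, hf, hor⟩
    · rcases hor with ⟨h1, h2⟩ | ⟨h1, h2⟩
      · exact Or.inr (Or.inl ⟨h1.symm, h2.symm⟩)
      · exact Or.inr (Or.inr ⟨h2.symm, h1.symm⟩)
  · rintro (⟨f, hf, hor⟩ | ⟨rfl, rfl⟩ | ⟨rfl, rfl⟩)
    · exact ⟨f, Or.inl hf, hor⟩
    · exact ⟨e, Or.inr rfl, Or.inl ⟨rfl, rfl⟩⟩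
    · exact ⟨e, Or.inr rfl, Or.inr ⟨rfl, rfl⟩⟩

theorem pvConn_append_pair (E : List (Int × Int)) (e : Int × Int) (u w : Int) :
    pvConn (E ++ [e]) u w ↔
      (pvConn E u w ∨
       (pvConn E u e.1 ∧ pvConn E e.2 w) ∨
       (pvConn E u e.2 ∧ pvConn E e.1 w)) := by
  unfold pvConn
  rw [pv_rtg_congr (fun x y => pvStep_append_pair E e x y) u w]
  exact pv_rtg_pair (pvStep E) e.1 e.2 u w

-- ---- shared facts about edges / vertex sets (under Pre_) ----

theorem pvOpp_len2 (vertex : Int) (f : Int × Int × Int)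
    (h : [f.1, f.2.1, f.2.2].countP (fun x => decide (x = vertex)) = 1) :
    (pvOpp vertex f).length = 2 := by
  by_cases h1 : f.1 = vertex <;> by_cases h2 : f.2.1 = vertex <;> by_cases h3 : f.2.2 = vertex <;>
    simp_all [pvOpp]

theorem pvEdge_mem (vertex : Int) (f : Int × Int × Int)
    (h2 : (pvOpp vertex f).length = 2) (x : Int) :
    (x = (pvEdge vertex f).1 ∨ x = (pvEdge vertex f).2) ↔ x ∈ pvOpp vertex f := by
  have hperm := PySem.List.sorted_perm (pvOpp vertex f) (fun x => x) false
  have hlen : (PySem.List.sorted (pvOpp vertex f) (fun x => x) false).length = 2 :=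
    hperm.length_eq.trans h2
  obtain ⟨a, b, hs⟩ := List.length_eq_two.mp hlen
  rw [← hperm.mem_iff, hs]
  simp [pvEdge, hs]

theorem pv_mem_foldl_update (vertex : Int) (faces : List (Int × Int × Int))
    (s : PySem.Set Int) (x : Int) :
    x ∈ faces.foldl (fun s f => PySem.Set.update s (pvOpp vertex f)) s ↔
      x ∈ s ∨ ∃ f ∈ faces, x ∈ pvOpp vertex f := by
  induction faces generalizing s with
  | nil => simp
  | cons f t ih =>
    simp only [List.foldl_cons, ih, PySem.Set.mem_update, List.mem_cons]
    constructor
    · rintro ((h | h) | ⟨g, hg, hx⟩)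
      exacts [Or.inl h, Or.inr ⟨f, Or.inl rfl, h⟩, Or.inr ⟨g, Or.inr hg, hx⟩]
    · rintro (h | ⟨g, rfl | hg, hx⟩)
      exacts [Or.inl (Or.inl h), Or.inl (Or.inr hx), Or.inr ⟨g, hg, hx⟩]

theorem pv_mem_VA (vertex : Int) (faces : List (Int × Int × Int)) (x : Int) :
    x ∈ pvVA vertex faces ↔ ∃ f ∈ faces, x ∈ pvOpp vertex f := by
  have h := pv_mem_foldl_update vertex faces PySem.Set.empty x
  simpa [pvVA, PySem.Set.empty] using h

theorem pv_nodup_foldl_update (vertex : Int) (faces : List (Int × Int × Int))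
    (s : PySem.Set Int) (h : s.Nodup) :
    (faces.foldl (fun s f => PySem.Set.update s (pvOpp vertex f)) s).Nodup := by
  induction faces generalizing s with
  | nil => exact h
  | cons f t ih => exact ih _ (PySem.Set.nodup_update _ _ h)

theorem pv_nodup_VA (vertex : Int) (faces : List (Int × Int × Int)) :
    (pvVA vertex faces).Nodup :=
  pv_nodup_foldl_update vertex faces PySem.Set.empty List.nodup_nil

theorem pv_mem_VB (vertex : Int) (faces : List (Int × Int × Int)) (x : Int) :
    x ∈ pvVB vertex faces ↔ ∃ e ∈ pvE vertex faces, x = e.1 ∨ x = e.2 := by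
  simp [pvVB, PySem.Set.mem_ofList, List.mem_flatMap]

theorem pv_mem_VA_iff_VB (vertex : Int) (faces : List (Int × Int × Int))
    (hpre : ∀ f ∈ faces, [f.1, f.2.1, f.2.2].countP (fun x => decide (x = vertex)) = 1) (x : Int) :
    (x ∈ pvVA vertex faces ↔ x ∈ pvVB vertex faces) := by
  rw [pv_mem_VA, pv_mem_VB]
  constructor
  · rintro ⟨f, hf, hx⟩
    exact ⟨pvEdge vertex f, List.mem_map_of_mem hf,
      (pvEdge_mem vertex f (pvOpp_len2 vertex f (hpre f hf)) x).mpr hx⟩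
  · rintro ⟨e, he, hx⟩
    obtain ⟨f, hf, rfl⟩ := List.mem_map.mp he
    exact ⟨f, hf, (pvEdge_mem vertex f (pvOpp_len2 vertex f (hpre f hf)) x).mp hx⟩

theorem pv_edge_ends_mem_VB (vertex : Int) (faces : List (Int × Int × Int)) (e : Int × Int)
    (he : e ∈ pvE vertex faces) : e.1 ∈ pvVB vertex faces ∧ e.2 ∈ pvVB vertex faces :=
  ⟨(pv_mem_VB _ _ _).mpr ⟨e, he, Or.inl rfl⟩, (pv_mem_VB _ _ _).mpr ⟨e, he, Or.inr rfl⟩⟩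

-- ---- degree check ----

theorem pv_foldl_double_modify_int (E : List (Int × Int)) (d : PySem.Dict Int Int) :
    E.foldl (fun d e => (PySem.Dict.modify d e.1 0 (· + 1)).modify e.2 0 (· + 1)) d =
      (E.flatMap (fun e => [e.1, e.2])).foldl (fun d x => PySem.Dict.modify d x 0 (· + 1)) d := by
  rw [List.foldl_flatMap]
  rfl

theorem pv_getD_foldl_insert_zero (l : List Int) (d : PySem.Dict Int Int)
    (h : ∀ u, d.getD u 0 = 0) (u : Int) :
    (l.foldl (fun d v => d.insert v 0) d).getD u 0 = 0 := by
  induction l generalizing d with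
  | nil => exact h u
  | cons v t ih =>
    refine ih _ (fun u => ?_)
    rw [PySem.Dict.getD_insert]
    split <;> simp [h]

theorem pv_degD (vertex : Int) (faces : List (Int × Int × Int)) (v : Int) :
    ((pvE vertex faces).foldl
        (fun d e => (PySem.Dict.modify d e.1 0 (· + 1)).modify e.2 0 (· + 1))
        ((pvVA vertex faces).foldl (fun d v => d.insert v (0 : Int)) PySem.Dict.empty)).getD v 0 =
      (((pvE vertex faces).flatMap (fun e => [e.1, e.2])).count v : Int) := by
  rw [pv_foldl_double_modify_int, PySem.Dict.getD_foldl_modify_add_one,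
    pv_getD_foldl_insert_zero _ _ (fun u => by simp [PySem.Dict.getD_empty]), zero_add]

theorem pv_update_of_forall_mem (s : PySem.Set Int) (xs : List Int) (h : ∀ x ∈ xs, x ∈ s) :
    PySem.Set.update s xs = s := by
  rw [PySem.Set.update_eq_append_filter]
  have hf : (PySem.Set.ofList xs).filter (fun y => !s.contains y) = [] := by
    rw [List.filter_eq_nil_iff]
    intro y hy
    have hm := h y ((PySem.Set.mem_ofList xs y).mp hy)
    simp [hm]
  rw [hf, List.append_nil]

theorem pv_deg_keys (vertex : Int) (faces : List (Int × Int × Int))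
    (hend : ∀ x ∈ (pvE vertex faces).flatMap (fun e => [e.1, e.2]), x ∈ pvVA vertex faces) :
    ((pvE vertex faces).foldl
        (fun d e => (PySem.Dict.modify d e.1 0 (· + 1)).modify e.2 0 (· + 1))
        ((pvVA vertex faces).foldl (fun d v => d.insert v (0 : Int)) PySem.Dict.empty)).keys =
      pvVA vertex faces := by
  rw [pv_foldl_double_modify_int, PySem.Dict.keys_foldl_modify, PySem.Dict.keys_foldl_insert]
  have h0 : (PySem.Dict.empty : PySem.Dict Int Int).keys = ([] : List Int) := rfl
  rw [h0, PySem.Set.update_nil_left,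
    PySem.Set.ofList_eq_self_of_nodup _ (pv_nodup_VA vertex faces)]
  exact pv_update_of_forall_mem _ _ hend

-- ---- adjacency ----

theorem pv_foldl_double_modify_adj (E : List (Int × Int)) (d : PySem.Dict Int (List Int)) :
    E.foldl (fun d e => (PySem.Dict.modify d e.1 [] (· ++ [e.2])).modify e.2 [] (· ++ [e.1])) d =
      (E.flatMap (fun e => [(e.1, e.2), (e.2, e.1)])).foldl
        (fun d p => PySem.Dict.modify d p.1 [] (· ++ [p.2])) d := by
  rw [List.foldl_flatMap]
  rfl

theorem pv_getD_foldl_insert_nil (l : List Int) (d : PySem.Dict Int (List Int))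
    (h : ∀ u, d.getD u [] = []) (u : Int) :
    (l.foldl (fun d v => d.insert v ([] : List Int)) d).getD u [] = [] := by
  induction l generalizing d with
  | nil => exact h u
  | cons v t ih =>
    refine ih _ (fun u => ?_)
    rw [PySem.Dict.getD_insert]
    split <;> simp [h]

theorem pv_adjD (vertex : Int) (faces : List (Int × Int × Int)) (u w : Int) :
    (w ∈ ((pvE vertex faces).foldl
        (fun d e => (PySem.Dict.modify d e.1 [] (· ++ [e.2])).modify e.2 [] (· ++ [e.1]))
        ((pvVA vertex faces).foldl (fun d v => d.insert v ([] : List Int))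
          PySem.Dict.empty)).getD u []) ↔ pvStep (pvE vertex faces) u w := by
  rw [pv_foldl_double_modify_adj, PySem.Dict.getD_foldl_modify_append,
    pv_getD_foldl_insert_nil _ _ (fun u => by simp [PySem.Dict.getD_empty])]
  simp only [List.nil_append, List.mem_map, List.mem_filter, List.mem_flatMap, pvStep]
  constructor
  · rintro ⟨p, ⟨⟨e, he, hp⟩, hpu⟩, rfl⟩
    simp only [List.mem_cons, List.not_mem_nil, or_false] at hp
    rcases hp with rfl | rfl
    · exact ⟨e, he, Or.inl ⟨by simpa using hpu, rfl⟩⟩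
    · exact ⟨e, he, Or.inr ⟨rfl, by simpa using hpu⟩⟩
  · rintro ⟨e, he, ⟨rfl, rfl⟩ | ⟨rfl, rfl⟩⟩
    · exact ⟨(e.1, e.2), ⟨⟨e, he, by simp⟩, by simp⟩, rfl⟩
    · exact ⟨(e.2, e.1), ⟨⟨e, he, by simp⟩, by simp⟩, rfl⟩

-- ---- DFS ----

theorem pvDFS_sup (adj : PySem.Dict Int (List Int)) (seen : PySem.Set Int) (stack : List Int)
    (x : Int) (h : x ∈ seen) : x ∈ pvDFS adj seen stack := by
  induction seen, stack using pvDFS.induct adj with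
  | case1 seen => rw [pvDFS]; exact h
  | case2 seen u rest ih =>
    rw [pvDFS]
    exact ih (((pvDFSstep_mem (adj.getD u []) seen rest x).1).mpr (Or.inl h))

theorem pvDFS_sub (adj : PySem.Dict Int (List Int)) (seen : PySem.Set Int) (stack : List Int)
    (x : Int) (hx : x ∈ pvDFS adj seen stack) :
    x ∈ seen ∨ ∃ u ∈ stack, Relation.ReflTransGen (fun a b => b ∈ adj.getD a []) u x := by
  induction seen, stack using pvDFS.induct adj with
  | case1 seen => rw [pvDFS] at hx; exact Or.inl hx
  | case2 seen u rest ih =>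
    rw [pvDFS] at hx
    rcases ih hx with hs | ⟨u', hu', hr⟩
    · rcases ((pvDFSstep_mem (adj.getD u []) seen rest x).1).mp hs with h | h
      · exact Or.inl h
      · exact Or.inr ⟨u, List.mem_cons_self .., Relation.ReflTransGen.single h⟩
    · rcases ((pvDFSstep_mem (adj.getD u []) seen rest u').2).mp hu' with h | ⟨hn, _⟩
      · exact Or.inr ⟨u', List.mem_cons_of_mem _ h, hr⟩
      · exact Or.inr ⟨u, List.mem_cons_self ..,
          (Relation.ReflTransGen.single hn).trans hr⟩

theorem pvDFS_closed (adj : PySem.Dict Int (List Int)) (seen : PySem.Set Int) (stack : List Int)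
    (hinv : ∀ u ∈ seen, u ∈ stack ∨ ∀ w ∈ adj.getD u [], w ∈ seen)
    (hstack : ∀ u ∈ stack, u ∈ seen) :
    ∀ u ∈ pvDFS adj seen stack, ∀ w ∈ adj.getD u [], w ∈ pvDFS adj seen stack := by
  induction seen, stack using pvDFS.induct adj with
  | case1 seen =>
    intro u hu w hw
    rw [pvDFS] at hu ⊢
    rcases hinv u hu with h | h
    · cases h
    · exact h w hw
  | case2 seen u0 rest ih =>
    rw [pvDFS]
    refine ih ?_ ?_
    · intro v hv
      rcases ((pvDFSstep_mem (adj.getD u0 []) seen rest v).1).mp hv with hvs | hvn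
      · rcases hinv v hvs with hvstack | hclosed
        · rcases List.mem_cons.mp hvstack with rfl | hvrest
          · right
            intro w hw
            exact ((pvDFSstep_mem (adj.getD v []) seen rest w).1).mpr (Or.inr hw)
          · left
            exact ((pvDFSstep_mem (adj.getD u0 []) seen rest v).2).mpr (Or.inl hvrest)
        · right
          intro w hw
          exact ((pvDFSstep_mem (adj.getD u0 []) seen rest w).1).mpr (Or.inl (hclosed w hw))
      · by_cases hvs : v ∈ seen
        · rcases hinv v hvs with hvstack | hclosed
          · rcases List.mem_cons.mp hvstack with rfl | hvrest
            · right
              intro w hw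
              exact ((pvDFSstep_mem (adj.getD v []) seen rest w).1).mpr (Or.inr hw)
            · left
              exact ((pvDFSstep_mem (adj.getD u0 []) seen rest v).2).mpr (Or.inl hvrest)
          · right
            intro w hw
            exact ((pvDFSstep_mem (adj.getD u0 []) seen rest w).1).mpr (Or.inl (hclosed w hw))
        · left
          exact ((pvDFSstep_mem (adj.getD u0 []) seen rest v).2).mpr (Or.inr ⟨hvn, hvs⟩)
    · intro v hv
      rcases ((pvDFSstep_mem (adj.getD u0 []) seen rest v).2).mp hv with hvrest | ⟨hvn, _⟩
      · exact ((pvDFSstep_mem (adj.getD u0 []) seen rest v).1).mpr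
          (Or.inl (hstack v (List.mem_cons_of_mem _ hvrest)))
      · exact ((pvDFSstep_mem (adj.getD u0 []) seen rest v).1).mpr (Or.inr hvn)

theorem pvDFS_nodup (adj : PySem.Dict Int (List Int)) (seen : PySem.Set Int) (stack : List Int)
    (h : seen.Nodup) : (pvDFS adj seen stack).Nodup := by
  induction seen, stack using pvDFS.induct adj with
  | case1 seen => rw [pvDFS]; exact h
  | case2 seen u rest ih =>
    rw [pvDFS]
    refine ih ?_
    have haux : ∀ (nbrs : List Int) (s : PySem.Set Int) (st : List Int), s.Nodup →
        (pvDFSstep s st nbrs).1.Nodup := by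
      intro nbrs
      induction nbrs with
      | nil => intro s st hs; exact hs
      | cons w t iht =>
        intro s st hs
        by_cases hw : w ∈ s
        · rw [show pvDFSstep s st (w :: t) = pvDFSstep s st t from by simp [pvDFSstep, hw]]
          exact iht s st hs
        · rw [show pvDFSstep s st (w :: t) = pvDFSstep (PySem.Set.add s w) (w :: st) t from by
            simp [pvDFSstep, hw]]
          exact iht _ _ (PySem.Set.nodup_add _ _ hs)
    exact haux _ _ _ h

theorem pvDFS_char (adj : PySem.Dict Int (List Int)) (start : Int) (x : Int) :
    x ∈ pvDFS adj (PySem.Set.ofList [start]) [start] ↔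
      Relation.ReflTransGen (fun a b => b ∈ adj.getD a []) start x := by
  have hof : PySem.Set.ofList [start] = [start] := rfl
  constructor
  · intro hx
    rcases pvDFS_sub adj _ _ x hx with h | ⟨u, hu, h⟩
    · rw [hof] at h
      rcases List.mem_singleton.mp h with rfl
      exact Relation.ReflTransGen.refl
    · rcases List.mem_singleton.mp hu with rfl
      exact h
  · intro h
    have hcl := pvDFS_closed adj (PySem.Set.ofList [start]) [start]
      (fun u hu => Or.inl (by rw [hof] at hu; simpa using hu))
      (fun u hu => by rw [hof]; simpa using hu)
    induction h with
    | refl => exact pvDFS_sup adj _ _ start (by rw [hof]; simp)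
    | tail hprev hstep ih => exact hcl _ ih _ hstep

-- ---- union-by-relabel invariant (B) ----

theorem pv_items_ofList_pairs (V : List Int) (g : Int → Int) (hnd : V.Nodup) :
    (PySem.Dict.ofList (V.map (fun v => (v, g v)))).items = V.map (fun v => (v, g v)) := by
  have h1 : PySem.Dict.ofList (V.map (fun v => (v, g v))) =
      V.foldl (fun d v => d.insert v (g v)) PySem.Dict.empty := by
    show (V.map (fun v => (v, g v))).foldl (fun acc p => acc.insert p.1 p.2) PySem.Dict.empty = _
    rw [List.foldl_map]
  rw [h1, PySem.Dict.items_foldl_insert_fresh V (fun v => v) g PySem.Dict.empty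
    (fun a _ => PySem.Dict.contains_empty a) (by simpa using hnd)]
  rfl

theorem pvMerge_inv (V : List Int) (hnd : V.Nodup) (E : List (Int × Int))
    (hE : ∀ e ∈ E, e.1 ∈ V ∧ e.2 ∈ V) (Epre : List (Int × Int)) (c : PySem.Dict Int Int)
    (lab : Int → Int) (hitems : c.items = V.map (fun v => (v, lab v)))
    (hiff : ∀ u ∈ V, ∀ w ∈ V, (lab u = lab w ↔ pvConn Epre u w)) :
    ∃ lab' : Int → Int,
      (E.foldl pvMerge c).items = V.map (fun v => (v, lab' v)) ∧
      ∀ u ∈ V, ∀ w ∈ V, (lab' u = lab' w ↔ pvConn (Epre ++ E) u w) := by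
  induction E generalizing Epre c lab with
  | nil => exact ⟨lab, by simpa using hitems, by simpa using hiff⟩
  | cons e t ih =>
    have ha : e.1 ∈ V := (hE e (List.mem_cons_self ..)).1
    have hb : e.2 ∈ V := (hE e (List.mem_cons_self ..)).2
    have hEt : ∀ e' ∈ t, e'.1 ∈ V ∧ e'.2 ∈ V := fun e' he' => hE e' (List.mem_cons_of_mem _ he')
    have hkeys : c.keys = V := by
      simp [PySem.Dict.keys, hitems, List.map_map, Function.comp_def]
    have hknd : c.keys.Nodup := by rw [hkeys]; exact hnd
    have hga : c.getD e.1 0 = lab e.1 :=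
      PySem.Dict.getD_of_mem_items c (by rw [hitems]; exact List.mem_map_of_mem ha) hknd 0
    have hgb : c.getD e.2 0 = lab e.2 :=
      PySem.Dict.getD_of_mem_items c (by rw [hitems]; exact List.mem_map_of_mem hb) hknd 0
    rw [List.foldl_cons]
    by_cases hc : lab e.1 = lab e.2
    · have hm : pvMerge c e = c := by simp [pvMerge, hga, hgb, hc]
      rw [hm]
      have hab : pvConn Epre e.1 e.2 := (hiff e.1 ha e.2 hb).mp hc
      have hiff' : ∀ u ∈ V, ∀ w ∈ V, (lab u = lab w ↔ pvConn (Epre ++ [e]) u w) := by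
        intro u hu w hw
        rw [pvConn_append_pair]
        constructor
        · intro hl
          exact Or.inl ((hiff u hu w hw).mp hl)
        · rintro (d | ⟨da, db⟩ | ⟨da, db⟩)
          · exact (hiff u hu w hw).mpr d
          · exact (hiff u hu w hw).mpr ((da.trans hab).trans db)
          · exact (hiff u hu w hw).mpr ((da.trans (pvConn_symm _ _ _ hab)).trans db)
      obtain ⟨lab', h1, h2⟩ := ih hEt (Epre ++ [e]) c lab hitems hiff'
      refine ⟨lab', h1, ?_⟩
      rw [List.append_assoc] at h2
      exact h2
    · have hm : pvMerge c e =
          PySem.Dict.ofList (c.items.map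
            (fun p => (p.1, if p.2 = lab e.1 then lab e.2 else p.2))) := by
        simp only [pvMerge, hga, hgb]
        rw [if_pos hc]
      have hitems2 : (pvMerge c e).items =
          V.map (fun v => (v, if lab v = lab e.1 then lab e.2 else lab v)) := by
        rw [hm, hitems, List.map_map]
        exact pv_items_ofList_pairs V (fun v => if lab v = lab e.1 then lab e.2 else lab v) hnd
      have hiff2 : ∀ u ∈ V, ∀ w ∈ V,
          ((if lab u = lab e.1 then lab e.2 else lab u) =
            (if lab w = lab e.1 then lab e.2 else lab w) ↔ pvConn (Epre ++ [e]) u w) := by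
        intro u hu w hw
        rw [pvConn_append_pair]
        have hua := hiff u hu e.1 ha
        have hub := hiff u hu e.2 hb
        have hwa := hiff w hw e.1 ha
        have hwb := hiff w hw e.2 hb
        have huw := hiff u hu w hw
        by_cases h1 : lab u = lab e.1 <;> by_cases h2 : lab w = lab e.1
        · rw [if_pos h1, if_pos h2]
          exact iff_of_true rfl
            (Or.inl ((hua.mp h1).trans (pvConn_symm _ _ _ (hwa.mp h2))))
        · rw [if_pos h1, if_neg h2]
          constructor
          · intro hl
            exact Or.inr (Or.inl ⟨hua.mp h1, pvConn_symm _ _ _ (hwb.mp hl.symm)⟩)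
          · rintro (d | ⟨da, db⟩ | ⟨da, db⟩)
            · exact absurd (hwa.mpr ((pvConn_symm _ _ _ d).trans (hua.mp h1))) h2
            · exact (hwb.mpr (pvConn_symm _ _ _ db)).symm
            · exact absurd (hwa.mpr (pvConn_symm _ _ _ db)) h2
        · rw [if_neg h1, if_pos h2]
          constructor
          · intro hl
            exact Or.inr (Or.inr ⟨hub.mp hl, pvConn_symm _ _ _ (hwa.mp h2)⟩)
          · rintro (d | ⟨da, db⟩ | ⟨da, db⟩)
            · exact absurd (hua.mpr (d.trans (hwa.mp h2))) h1
            · exact absurd (hua.mpr da) h1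
            · exact hub.mpr da
        · rw [if_neg h1, if_neg h2]
          constructor
          · intro hl
            exact Or.inl (huw.mp hl)
          · rintro (d | ⟨da, db⟩ | ⟨da, db⟩)
            · exact huw.mpr d
            · exact absurd (hua.mpr da) h1
            · exact absurd (hwa.mpr (pvConn_symm _ _ _ db)) h2
      obtain ⟨lab', h1, h2⟩ := ih hEt (Epre ++ [e]) (pvMerge c e)
        (fun v => if lab v = lab e.1 then lab e.2 else lab v) hitems2 hiff2
      refine ⟨lab', h1, ?_⟩
      rw [List.append_assoc] at h2
      exact h2

-- ---- further bridges used by the final assembly ----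

theorem pv_sum_count (l : List (Int × Int)) (v : Int) :
    (l.map (fun e => (if v = e.1 then (1 : Int) else 0) + (if v = e.2 then 1 else 0))).sum =
      ((l.flatMap (fun e => [e.1, e.2])).count v : Int) := by
  induction l with
  | nil => simp
  | cons e t iht =>
    simp only [List.map_cons, List.sum_cons, iht, List.flatMap_cons, List.count_append]
    have hpair : ([e.1, e.2].count v : Int) =
        (if v = e.1 then (1 : Int) else 0) + (if v = e.2 then 1 else 0) := by
      by_cases h1 : v = e.1 <;> by_cases h2 : v = e.2 <;>
        simp [List.count_cons, h1, h2] <;> omega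
    push_cast
    push_cast at hpair
    rw [hpair]

theorem pvConn_nil (u w : Int) : pvConn [] u w ↔ u = w := by
  unfold pvConn
  rw [Relation.reflTransGen_iff_eq (by simp [pvStep])]
  exact eq_comm

-- ---- final-value characterisations ----

theorem pv_setlen_one (xs : List Int) :
    ((PySem.Set.len (PySem.Set.ofList xs) == 1) = true) ↔
      (xs ≠ [] ∧ ∀ x ∈ xs, ∀ y ∈ xs, x = y) := by
  have hlen : ((PySem.Set.len (PySem.Set.ofList xs) == 1) = true) ↔
      (PySem.Set.ofList xs).length = 1 := by
    simp [PySem.Set.len]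
  rw [hlen, List.length_eq_one_iff]
  constructor
  · rintro ⟨c, hc⟩
    constructor
    · intro hnil
      subst hnil
      simp [PySem.Set.ofList] at hc
    · intro x hx y hy
      have hx' := (PySem.Set.mem_ofList xs x).mpr hx
      have hy' := (PySem.Set.mem_ofList xs y).mpr hy
      rw [hc] at hx' hy'
      rw [List.mem_singleton.mp hx', List.mem_singleton.mp hy']
  · rintro ⟨hne, hall⟩
    obtain ⟨z, t, rfl⟩ := List.exists_cons_of_ne_nil hne
    refine ⟨z, ?_⟩
    have hnd := PySem.Set.nodup_ofList (z :: t)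
    have hz : z ∈ PySem.Set.ofList (z :: t) :=
      (PySem.Set.mem_ofList _ z).mpr (List.mem_cons_self ..)
    have hallz : ∀ x ∈ PySem.Set.ofList (z :: t), x = z := fun x hx =>
      hall x ((PySem.Set.mem_ofList _ x).mp hx) z (List.mem_cons_self ..)
    rcases hof : PySem.Set.ofList (z :: t) with _ | ⟨a, t'⟩
    · rw [hof] at hz; cases hz
    · rw [hof] at hnd hz hallz
      have ha : a = z := hallz a (List.mem_cons_self ..)
      have ht' : t' = [] := by
        rcases t' with _ | ⟨b, t''⟩
        · rfl
        · have hb : b = z := hallz b (List.mem_cons_of_mem _ (List.mem_cons_self ..))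
          rw [ha] at hnd
          rw [hb] at hnd
          simp at hnd
      rw [ha, ht']

theorem pv_len_eq_iff (F V : List Int) (hF : F.Nodup) (hV : V.Nodup) (hsub : ∀ x ∈ F, x ∈ V) :
    ((PySem.Set.len F == PySem.Set.len V) = true) ↔ ∀ v ∈ V, v ∈ F := by
  have hlen : ((PySem.Set.len F == PySem.Set.len V) = true) ↔ F.length = V.length := by
    simp [PySem.Set.len]
  rw [hlen]
  constructor
  · intro hl v hv
    have hsubF : F.toFinset ⊆ V.toFinset := fun a ha =>
      List.mem_toFinset.mpr (hsub a (List.mem_toFinset.mp ha))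
    have hcard : V.toFinset.card ≤ F.toFinset.card := by
      rw [List.toFinset_card_of_nodup hF, List.toFinset_card_of_nodup hV, hl]
    have := Finset.eq_of_subset_of_card_le hsubF hcard
    exact List.mem_toFinset.mp (this ▸ List.mem_toFinset.mpr hv)
  · intro hsup
    exact ((List.perm_ext_iff_of_nodup hF hV).mpr (fun a => ⟨hsub a, hsup a⟩)).length_eq


-- ===== VERDICT (by name: the statement is the Claim_ definition above) =====
theorem vertex_link_is_disk_spec : Claim_equal_vertex_link_is_disk := by
  intro vertex faces _hdom hpre
  obtain ⟨hne, hcnt⟩ := hpre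
  unfold Spec_vertex_link_is_disk
  have hmemAB := pv_mem_VA_iff_VB vertex faces hcnt
  have hendB : ∀ x ∈ (pvE vertex faces).flatMap (fun e => [e.1, e.2]), x ∈ pvVB vertex faces := by
    intro x hx
    obtain ⟨e, he, hx⟩ := List.mem_flatMap.mp hx
    simp only [List.mem_cons, List.not_mem_nil, or_false] at hx
    exact (pv_mem_VB vertex faces x).mpr ⟨e, he, hx⟩
  have hendA : ∀ x ∈ (pvE vertex faces).flatMap (fun e => [e.1, e.2]), x ∈ pvVA vertex faces :=
    fun x hx => (hmemAB x).mpr (hendB x hx)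
  have hel : faces.foldl
      (fun (s : List (Int × Int) × PySem.Set Int) face =>
        (s.1 ++ [pvEdge vertex face], PySem.Set.update s.2 (pvOpp vertex face)))
      ([], PySem.Set.empty) = (pvE vertex faces, pvVA vertex faces) := by
    rw [PySem.List.foldl_prod_mk (f := fun s face => s ++ [pvEdge vertex face])
      (g := fun s face => PySem.Set.update s (pvOpp vertex face)),
      PySem.List.foldl_append_singleton_eq_map]
    rfl
  have hVAne : pvVA vertex faces ≠ [] := by
    rcases faces with _ | ⟨f, faces'⟩
    · exact absurd rfl hne
    · have hlen := pvOpp_len2 vertex f (hcnt f (List.mem_cons_self ..))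
      have hopne : pvOpp vertex f ≠ [] := by
        intro h; rw [h] at hlen; simp at hlen
      obtain ⟨x, hx⟩ := List.exists_mem_of_ne_nil _ hopne
      exact List.ne_nil_of_mem
        ((pv_mem_VA vertex (f :: faces') x).mpr ⟨f, List.mem_cons_self .., hx⟩)
  have hVBne : pvVB vertex faces ≠ [] := by
    obtain ⟨x, hx⟩ := List.exists_mem_of_ne_nil _ hVAne
    exact List.ne_nil_of_mem ((hmemAB x).mp hx)
  have hanyiff : ∀ g : Int → Bool, (pvVA vertex faces).any g = (pvVB vertex faces).any g := by
    intro g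
    apply Bool.coe_iff_coe.mp
    rw [List.any_eq_true, List.any_eq_true]
    constructor
    · rintro ⟨x, hx, hg⟩; exact ⟨x, (hmemAB x).mp hx, hg⟩
    · rintro ⟨x, hx, hg⟩; exact ⟨x, (hmemAB x).mpr hx, hg⟩
  have hdegA : (((pvE vertex faces).foldl
      (fun d e => (PySem.Dict.modify d e.1 0 (· + 1)).modify e.2 0 (· + 1))
      ((pvVA vertex faces).foldl (fun d v => d.insert v (0 : Int)) PySem.Dict.empty)).values.any
        (fun d => decide (d ≠ 2))) =
      ((pvVA vertex faces).any (fun v =>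
        decide ((((pvE vertex faces).flatMap (fun e => [e.1, e.2])).count v : Int) ≠ 2))) := by
    have hkeys := pv_deg_keys vertex faces hendA
    rw [PySem.Dict.values_eq_map_keys _ (by rw [hkeys]; exact pv_nodup_VA vertex faces) 0,
      hkeys, List.any_map]
    refine PySem.List.any_congr_mem (fun v hv => ?_)
    simp only [Function.comp]
    simp only [pv_degD]
  have hdegB : ((pvVB vertex faces).any (fun v =>
      decide (((pvE vertex faces).map (fun e =>
        (if v = e.1 then (1 : Int) else 0) + (if v = e.2 then 1 else 0))).sum ≠ 2))) =
      ((pvVB vertex faces).any (fun v =>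
        decide ((((pvE vertex faces).flatMap (fun e => [e.1, e.2])).count v : Int) ≠ 2))) := by
    refine PySem.List.any_congr_mem (fun v hv => ?_)
    rw [pv_sum_count]
  simp only [vertex_link_is_disk, vertex_link_is_disk_alt, hel]
  rw [show List.map (fun face => pvEdge vertex face) faces = pvE vertex faces from rfl]
  rw [show PySem.Set.ofList ((pvE vertex faces).flatMap (fun e => [e.1, e.2])) =
    pvVB vertex faces from rfl]
  rw [hdegA, hdegB, hanyiff]
  cases hb : (pvVB vertex faces).any (fun v =>
      decide ((((pvE vertex faces).flatMap (fun e => [e.1, e.2])).count v : Int) ≠ 2)) with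
  | true => rfl
  | false =>
    rw [if_neg Bool.false_ne_true, if_neg Bool.false_ne_true]
    split
    · next hnil => exact absurd hnil hVAne
    · next start rest hcons =>
      have hstartVA : start ∈ pvVA vertex faces := by
        rw [hcons]; exact List.mem_cons_self ..
      -- characterise A's DFS result
      have hchar : ∀ x, x ∈ pvDFS
          ((pvE vertex faces).foldl
            (fun d e => (PySem.Dict.modify d e.1 [] (· ++ [e.2])).modify e.2 [] (· ++ [e.1]))
            ((pvVA vertex faces).foldl (fun d v => d.insert v ([] : List Int)) PySem.Dict.empty))
          (PySem.Set.ofList [start]) [start] ↔ pvConn (pvE vertex faces) start x := by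
        intro x
        rw [pvDFS_char]
        exact pv_rtg_congr (fun a b => pv_adjD vertex faces a b) start x
      have hFsub : ∀ x ∈ pvDFS
          ((pvE vertex faces).foldl
            (fun d e => (PySem.Dict.modify d e.1 [] (· ++ [e.2])).modify e.2 [] (· ++ [e.1]))
            ((pvVA vertex faces).foldl (fun d v => d.insert v ([] : List Int)) PySem.Dict.empty))
          (PySem.Set.ofList [start]) [start], x ∈ pvVA vertex faces := by
        intro x hx
        have h := (hchar x).mp hx
        clear hx
        induction h with
        | refl => exact hstartVA
        | tail hprev hstep ih =>
          obtain ⟨e, he, hor⟩ := hstep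
          rcases hor with ⟨h1, rfl⟩ | ⟨rfl, h2⟩
          · exact (hmemAB _).mpr ((pv_mem_VB vertex faces _).mpr ⟨e, he, Or.inr rfl⟩)
          · exact (hmemAB _).mpr ((pv_mem_VB vertex faces _).mpr ⟨e, he, Or.inl rfl⟩)
      -- B's relabelling result
      have hEends : ∀ e ∈ pvE vertex faces,
          e.1 ∈ pvVB vertex faces ∧ e.2 ∈ pvVB vertex faces :=
        fun e he => pv_edge_ends_mem_VB vertex faces e he
      have hVBnd : (pvVB vertex faces).Nodup := PySem.Set.nodup_ofList _
      have hiff0 : ∀ u ∈ pvVB vertex faces, ∀ w ∈ pvVB vertex faces,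
          ((fun v => v) u = (fun v => v) w ↔ pvConn [] u w) := by
        intro u _ w _
        simpa using (pvConn_nil u w).symm
      obtain ⟨lab, hitems, hiff⟩ := pvMerge_inv (pvVB vertex faces) hVBnd (pvE vertex faces)
        hEends [] _ (fun v => v)
        (pv_items_ofList_pairs (pvVB vertex faces) (fun v => v) hVBnd) hiff0
      simp only [List.nil_append] at hiff
      have hvals : (List.foldl pvMerge
          (PySem.Dict.ofList ((pvVB vertex faces).map (fun v => (v, v))))
          (pvE vertex faces)).values = (pvVB vertex faces).map lab := by
        simp only [PySem.Dict.values, hitems, List.map_map]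
        rfl
      rw [hvals]
      apply Bool.coe_iff_coe.mp
      rw [pv_len_eq_iff _ _
        (pvDFS_nodup _ _ _ (by simp)) (pv_nodup_VA vertex faces) hFsub,
        pv_setlen_one]
      constructor
      · intro h
        constructor
        · intro h0
          exact hVBne (List.map_eq_nil_iff.mp h0)
        · intro x hx y hy
          obtain ⟨u, hu, rfl⟩ := List.mem_map.mp hx
          obtain ⟨w, hw, rfl⟩ := List.mem_map.mp hy
          refine (hiff u hu w hw).mpr ?_
          have hconnu := (hchar u).mp (h u ((hmemAB u).mpr hu))
          have hconnw := (hchar w).mp (h w ((hmemAB w).mpr hw))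
          exact (pvConn_symm _ _ _ hconnu).trans hconnw
      · rintro ⟨hmapne, hall⟩ v hv
        have hstartB : start ∈ pvVB vertex faces := (hmemAB start).mp hstartVA
        have hvB : v ∈ pvVB vertex faces := (hmemAB v).mp hv
        have hl := hall (lab start) (List.mem_map_of_mem hstartB)
          (lab v) (List.mem_map_of_mem hvB)
        exact (hchar v).mpr ((hiff start hstartB v hvB).mp hl)
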